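-- pv_equiv track=rewrite | github.com/vktr-r2/code-wars | 6-kyu/count_the_photos.py | count_photos
-- ===== SOURCE A (Python) =====
-- def count_photos(road):
--     tally = 0
--     i = 0
--     limit = len(road) - 1
--
--     while i <= limit:
--         if road[i] == ">":
--             right_limit = limit
--             right_i = i
--
--             while right_i <= right_limit:
--                 if road[right_i] == ".":
--                     tally += 1
--
--                 right_i += 1
--
--         if road[i] == "<":
--             left_i = i
--
--             while left_i >= 0:
--                 if road[left_i] == ".":
--                     tally += 1
--                 left_i -= 1
--
--         i += 1
--
--     return tally
-- ===== SOURCE B (Python) =====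
-- def count_photos(road):
--     tally = 0
--     rights = 0
--     dots = 0
--     for c in road:
--         if c == '.':
--             tally += rights
--             dots += 1
--         elif c == '<':
--             tally += dots
--         elif c == '>':
--             rights += 1
--     return tally
-- ===== Notes on version B (the rewrite author's own statement) =====
-- stated objective: faster
-- what changed: Replaced the per-camera rescans of the whole road (nested while loops) by a single pass that keeps running counts of dots and of rightward cameras seen so far.
import Mathlib
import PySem

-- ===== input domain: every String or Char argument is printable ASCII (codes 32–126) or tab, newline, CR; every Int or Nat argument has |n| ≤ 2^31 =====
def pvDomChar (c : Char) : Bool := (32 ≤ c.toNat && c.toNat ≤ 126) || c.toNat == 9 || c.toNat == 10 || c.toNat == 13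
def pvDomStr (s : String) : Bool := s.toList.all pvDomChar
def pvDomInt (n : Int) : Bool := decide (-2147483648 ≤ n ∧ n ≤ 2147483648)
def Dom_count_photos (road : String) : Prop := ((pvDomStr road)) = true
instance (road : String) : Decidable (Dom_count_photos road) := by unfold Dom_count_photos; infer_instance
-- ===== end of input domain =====

-- B replaces A's nested rescans by one pass with running dot/camera counts (asymptotically faster).


-- ===== PORT A =====
-- inner `while right_i <= right_limit` loop: scan the suffix, count dots
def cpRight : List Char → Int → Int
  | [], t => t
  | c :: rest, t => cpRight rest (if c = '.' then t + 1 else t)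

-- inner `while left_i >= 0` loop: scan (the reversed prefix, i.e. positions i down to 0), count dots
def cpLeft : List Char → Int → Int
  | [], t => t
  | c :: rest, t => cpLeft rest (if c = '.' then t + 1 else t)

-- outer `while i <= limit` loop; `pre` is the already-visited prefix reversed
def cpLoop : List Char → List Char → Int → Int
  | _, [], t => t
  | pre, c :: rest, t =>
    let t1 := if c = '>' then cpRight (c :: rest) t else t
    let t2 := if c = '<' then cpLeft (c :: pre) t1 else t1
    cpLoop (c :: pre) rest t2

def count_photos (road : String) : Int := cpLoop [] road.toList 0

-- ===== PORT B =====
def cpAlt : List Char → Int → Int → Int → Int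
  | [], tally, _, _ => tally
  | c :: rest, tally, rights, dots =>
    if c = '.' then cpAlt rest (tally + rights) rights (dots + 1)
    else if c = '<' then cpAlt rest (tally + dots) rights dots
    else if c = '>' then cpAlt rest tally (rights + 1) dots
    else cpAlt rest tally rights dots

def count_photos_alt (road : String) : Int := cpAlt road.toList 0 0 0

-- ===== PRECONDITION & SPEC =====
def Spec_count_photos (road : String) (out : Int) : Prop := out = count_photos_alt road
instance (road : String) (out : Int) : Decidable (Spec_count_photos road out) := by unfold Spec_count_photos; infer_instance

-- ===== CLAIM (what is proved, stated in full; the proofs are below) =====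
def Claim_equal_count_photos : Prop := ∀ (road : String), Dom_count_photos road → Spec_count_photos road (count_photos road)

-- ===== LEMMAS AND PROOFS =====
def pvDots : List Char → Int
  | [] => 0
  | c :: r => (if c = '.' then 1 else 0) + pvDots r

-- functional description of A's outer loop contribution
def pvG : List Char → List Char → Int
  | _, [] => 0
  | pre, c :: rest =>
      (if c = '>' then pvDots (c :: rest) else 0)
      + (if c = '<' then pvDots (c :: pre) else 0)
      + pvG (c :: pre) rest

-- functional description of B's loop contribution, d = dots seen so far
def pvK : List Char → Int → Int
  | [], _ => 0
  | c :: rest, d =>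
    if c = '.' then pvK rest (d + 1)
    else if c = '<' then d + pvK rest d
    else if c = '>' then pvDots rest + pvK rest d
    else pvK rest d

theorem cpRight_eq (l : List Char) (t : Int) : cpRight l t = t + pvDots l := by
  induction l generalizing t with
  | nil => simp [cpRight, pvDots]
  | cons c rest ih => simp [cpRight, pvDots, ih]; split_ifs <;> ring

theorem cpLeft_eq (l : List Char) (t : Int) : cpLeft l t = t + pvDots l := by
  induction l generalizing t with
  | nil => simp [cpLeft, pvDots]
  | cons c rest ih => simp [cpLeft, pvDots, ih]; split_ifs <;> ring

theorem cpLoop_eq (rest pre : List Char) (t : Int) :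
    cpLoop pre rest t = t + pvG pre rest := by
  induction rest generalizing pre t with
  | nil => simp [cpLoop, pvG]
  | cons c r ih => simp [cpLoop, pvG, ih, cpRight_eq, cpLeft_eq]; split_ifs <;> ring

theorem cpAlt_eq (l : List Char) (t r d : Int) :
    cpAlt l t r d = t + r * pvDots l + pvK l d := by
  induction l generalizing t r d with
  | nil => simp [cpAlt, pvK, pvDots]
  | cons c rest ih =>
    simp only [cpAlt, pvK, pvDots]
    split_ifs <;> simp [ih] <;> ring

theorem G_eq_K (rest pre : List Char) : pvG pre rest = pvK rest (pvDots pre) := by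
  induction rest generalizing pre with
  | nil => simp [pvG, pvK]
  | cons c r ih =>
    simp only [pvG, pvK]
    by_cases h1 : c = '.' <;> by_cases h2 : c = '<' <;> by_cases h3 : c = '>' <;>
      simp_all [pvDots, Int.add_comm]

-- ===== VERDICT (by name: the statement is the Claim_ definition above) =====
theorem count_photos_spec : Claim_equal_count_photos := by
  intro road _
  unfold Spec_count_photos count_photos count_photos_alt
  rw [cpLoop_eq, cpAlt_eq, G_eq_K]
  simp [pvDots]
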